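-- pv_equiv track=rewrite | github.com/DoubleJONY/KDJ-algorithm-challenge | heoh/boj-17143.py | move_axis
-- ===== SOURCE A (Python) =====
-- def move_axis(n, i, speed, direction):
--     delta = speed % ((n-1) * 2)
--     delta *= direction
--     i += delta
--     reversed = False
--     while True:
--         if i > n:
--             i  = n - (i - n)
--             reversed = not reversed
--         elif i < 1:
--             i = 1 + (1 - i)
--             reversed = not reversed
--         else:
--             break
--     return i, reversed
-- ===== SOURCE B (Python) =====
-- def move_axis(n, i, speed, direction):
--     period = (n - 1) * 2
--     m = i - 1 + (speed % period) * direction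
--     r = m % period
--     pos = r + 1 if r <= n - 1 else period - r + 1
--     if 0 < r < n - 1:
--         rev = False
--     elif r > n - 1:
--         rev = True
--     elif r == 0:
--         rev = m > 0
--     else:  # r == n - 1, an exact hit on the far wall
--         rev = m < 0
--     return pos, rev
-- ===== Notes on version B (the rewrite author's own statement) =====
-- stated objective: faster
-- what changed: Replaces A's iterative bounce-until-in-range loop with a single closed-form reflection: fold m = i-1+delta by r = m % (2*(n-1)) and read the final position and bounce parity directly from r (the two exact-wall cases decided by the sign of m).
import Mathlib
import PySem

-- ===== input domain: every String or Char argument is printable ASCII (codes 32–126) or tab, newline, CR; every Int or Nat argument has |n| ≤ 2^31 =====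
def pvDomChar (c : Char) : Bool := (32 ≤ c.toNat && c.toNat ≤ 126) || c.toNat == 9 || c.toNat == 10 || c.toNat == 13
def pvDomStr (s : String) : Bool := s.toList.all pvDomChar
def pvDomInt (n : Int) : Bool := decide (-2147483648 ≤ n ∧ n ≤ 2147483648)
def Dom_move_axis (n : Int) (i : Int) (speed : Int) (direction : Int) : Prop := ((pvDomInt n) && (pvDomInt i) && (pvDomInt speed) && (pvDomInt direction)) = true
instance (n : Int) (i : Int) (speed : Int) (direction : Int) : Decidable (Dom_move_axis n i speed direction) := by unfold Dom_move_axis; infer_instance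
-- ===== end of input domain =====

-- B replaces A's iterative bounce loop by a closed-form reflection (one divmod fold); objective: simpler/faster constant work.

-- ===== PORT A =====
-- A's 'while True' bounce loop, with a fuel guard that only makes the
-- recursion total in Lean: under Pre_ the fuel chosen below is never exhausted.
def moveLoopA (fuel : Nat) (n : Int) (i : Int) (rev : Bool) : Int × Bool :=
  match fuel with
  | 0 => (i, rev)
  | fuel + 1 =>
    if i > n then moveLoopA fuel n (n - (i - n)) (!rev)
    else if i < 1 then moveLoopA fuel n (1 + (1 - i)) (!rev)
    else (i, rev)

def move_axis (n : Int) (i : Int) (speed : Int) (direction : Int) : Int × Bool :=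
  let delta := PySem.Int.mod speed ((n - 1) * 2)
  let delta := delta * direction
  let i := i + delta
  moveLoopA ((max (i - n) (1 - i)).toNat + 1) n i false

-- ===== PORT B =====
def move_axis_alt (n : Int) (i : Int) (speed : Int) (direction : Int) : Int × Bool :=
  let period := (n - 1) * 2
  let m := i - 1 + (PySem.Int.mod speed period) * direction
  let r := PySem.Int.mod m period
  let pos := if r ≤ n - 1 then r + 1 else period - r + 1
  let rev := if 0 < r ∧ r < n - 1 then false
             else if r > n - 1 then true
             else if r = 0 then decide (m > 0)
             else decide (m < 0)
  (pos, rev)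

-- ===== PRECONDITION & SPEC =====
-- A raises ZeroDivisionError when n = 1 and loops forever when n ≤ 0; Pre_ keeps exactly the inputs where A returns.
def Pre_move_axis (n : Int) (i : Int) (speed : Int) (direction : Int) : Prop := 2 ≤ n
instance (n : Int) (i : Int) (speed : Int) (direction : Int) : Decidable (Pre_move_axis n i speed direction) := by unfold Pre_move_axis; infer_instance
def pvWitness_move_axis : Int × Int × Int × Int := (5, 3, 7, -1)

def Spec_move_axis (n : Int) (i : Int) (speed : Int) (direction : Int) (out : Int × Bool) : Prop := out = move_axis_alt n i speed direction
instance (n : Int) (i : Int) (speed : Int) (direction : Int) (out : Int × Bool) : Decidable (Spec_move_axis n i speed direction out) := by unfold Spec_move_axis; infer_instance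

-- ===== CLAIM (what is proved, stated in full; the proofs are below) =====
def Claim_equal_move_axis : Prop := ∀ (n : Int) (i : Int) (speed : Int) (direction : Int), Dom_move_axis n i speed direction → Pre_move_axis n i speed direction → Spec_move_axis n i speed direction (move_axis n i speed direction)

-- ===== LEMMAS AND PROOFS =====

-- closed-form folded position and parity for a (post-delta) 0-based offset m = i - 1
def foldPos (n m : Int) : Int :=
  if m % ((n - 1) * 2) ≤ n - 1 then m % ((n - 1) * 2) + 1
  else (n - 1) * 2 - m % ((n - 1) * 2) + 1

def foldRev (n m : Int) : Bool :=
  if 0 < m % ((n - 1) * 2) ∧ m % ((n - 1) * 2) < n - 1 then false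
  else if m % ((n - 1) * 2) > n - 1 then true
  else if m % ((n - 1) * 2) = 0 then decide (m > 0)
  else decide (m < 0)

lemma remod (n m : Int) (hn : 2 ≤ n) :
    (-m) % ((n - 1) * 2) =
      (if m % ((n - 1) * 2) = 0 then 0 else (n - 1) * 2 - m % ((n - 1) * 2)) := by
  have h1 : (0:Int) ≤ m % ((n - 1) * 2) := Int.emod_nonneg m (by omega)
  have h2 : m % ((n - 1) * 2) < (n - 1) * 2 := Int.emod_lt_of_pos m (by omega)
  have hnat : ((((n - 1) * 2).natAbs : Int)) = (n - 1) * 2 := Int.natAbs_of_nonneg (by omega)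
  rw [Int.neg_emod]
  by_cases h : ((n - 1) * 2) ∣ m
  · have h0 : m % ((n - 1) * 2) = 0 := Int.emod_eq_zero_of_dvd h
    rw [if_pos h, if_pos h0]
  · have h0 : m % ((n - 1) * 2) ≠ 0 := fun hc => h (Int.dvd_of_emod_eq_zero hc)
    rw [if_neg h, if_neg h0, hnat]

lemma sub_emod_per (n m : Int) :
    ((n - 1) * 2 - m) % ((n - 1) * 2) = (-m) % ((n - 1) * 2) := by
  have h : (n - 1) * 2 - m = -m + ((n - 1) * 2) * 1 := by ring
  rw [h, Int.add_mul_emod_self_left]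

lemma foldPos_neg (n m : Int) (hn : 2 ≤ n) : foldPos n (-m) = foldPos n m := by
  have h1 : (0:Int) ≤ m % ((n - 1) * 2) := Int.emod_nonneg m (by omega)
  have h2 : m % ((n - 1) * 2) < (n - 1) * 2 := Int.emod_lt_of_pos m (by omega)
  unfold foldPos
  rw [remod n m hn]
  split_ifs <;> omega

lemma foldPos_reflect (n m : Int) (hn : 2 ≤ n) : foldPos n ((n - 1) * 2 - m) = foldPos n m := by
  have h : foldPos n ((n - 1) * 2 - m) = foldPos n (-m) := by
    unfold foldPos; rw [sub_emod_per]
  rw [h, foldPos_neg n m hn]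

lemma foldRev_neg (n m : Int) (hn : 2 ≤ n) (hm : m < 0) : foldRev n (-m) = !(foldRev n m) := by
  have h1 : (0:Int) ≤ m % ((n - 1) * 2) := Int.emod_nonneg m (by omega)
  have h2 : m % ((n - 1) * 2) < (n - 1) * 2 := Int.emod_lt_of_pos m (by omega)
  unfold foldRev
  rw [remod n m hn]
  split_ifs <;> simp_all <;> omega

lemma foldRev_reflect_hi (n m : Int) (hn : 2 ≤ n) (hm : n ≤ m) :
    foldRev n ((n - 1) * 2 - m) = !(foldRev n m) := by
  have h1 : (0:Int) ≤ m % ((n - 1) * 2) := Int.emod_nonneg m (by omega)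
  have h2 : m % ((n - 1) * 2) < (n - 1) * 2 := Int.emod_lt_of_pos m (by omega)
  have hdiv : m % ((n - 1) * 2) + (n - 1) * 2 * (m / ((n - 1) * 2)) = m :=
    Int.emod_add_mul_ediv m ((n - 1) * 2)
  have hdvd : ((n - 1) * 2) ∣ m - m % ((n - 1) * 2) := ⟨m / ((n - 1) * 2), by omega⟩
  by_cases hr0 : m % ((n - 1) * 2) = 0
  · -- an exact multiple of the period: m has gone at least one full period forward
    have hge : (n - 1) * 2 ≤ m := by
      have := Int.le_of_dvd (show (0:Int) < m - m % ((n - 1) * 2) by omega) hdvd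
      omega
    have key : ((n - 1) * 2 - m) % ((n - 1) * 2) = 0 := by
      rw [sub_emod_per, remod n m hn, if_pos hr0]
    clear hdiv hdvd
    unfold foldRev
    rw [key, hr0]
    split_ifs <;> first | rfl | omega | (simp only [← decide_not, decide_eq_decide]; omega)
  · by_cases hrn : m % ((n - 1) * 2) = n - 1
    · -- an exact far-wall hit past the start: at least period + (n-1) forward
      have hge : (n - 1) * 2 + (n - 1) ≤ m := by
        have := Int.le_of_dvd (show (0:Int) < m - m % ((n - 1) * 2) by omega) hdvd
        omega
      have key : ((n - 1) * 2 - m) % ((n - 1) * 2) = n - 1 := by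
        rw [sub_emod_per, remod n m hn, if_neg hr0, hrn]; ring
      clear hdiv hdvd
      unfold foldRev
      rw [key, hrn]
      split_ifs <;> first | rfl | omega | (simp only [← decide_not, decide_eq_decide]; omega)
    · have key : ((n - 1) * 2 - m) % ((n - 1) * 2) = (n - 1) * 2 - m % ((n - 1) * 2) := by
        rw [sub_emod_per, remod n m hn, if_neg hr0]
      clear hdiv hdvd
      unfold foldRev
      rw [key]
      split_ifs <;> first | rfl | omega

lemma foldRev_in_range (n i : Int) (hn : 2 ≤ n) (hlo : 1 ≤ i) (hhi : i ≤ n) :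
    foldPos n (i - 1) = i ∧ foldRev n (i - 1) = false := by
  have hr : (i - 1) % ((n - 1) * 2) = i - 1 := Int.emod_eq_of_lt (by omega) (by omega)
  unfold foldPos foldRev
  rw [hr]
  refine ⟨by split_ifs <;> omega, ?_⟩
  split_ifs <;> simp_all <;> omega

lemma moveLoopA_correct : ∀ (fuel : Nat) (n i : Int) (rev : Bool),
    2 ≤ n → (max (i - n) (1 - i)).toNat < fuel →
    moveLoopA fuel n i rev = (foldPos n (i - 1), xor rev (foldRev n (i - 1))) := by
  intro fuel
  induction fuel with
  | zero => intro n i rev hn hf; omega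
  | succ fuel ih =>
    intro n i rev hn hf
    unfold moveLoopA
    by_cases hgt : i > n
    · simp only [if_pos hgt]
      rw [ih n (n - (i - n)) (!rev) hn (by omega)]
      have hm : n - (i - n) - 1 = (n - 1) * 2 - (i - 1) := by ring
      rw [hm, foldPos_reflect n (i - 1) hn, foldRev_reflect_hi n (i - 1) hn (by omega)]
      cases rev <;> cases foldRev n (i - 1) <;> simp
    · simp only [if_neg hgt]
      by_cases hlt : i < 1
      · simp only [if_pos hlt]
        rw [ih n (1 + (1 - i)) (!rev) hn (by omega)]
        have hm : 1 + (1 - i) - 1 = -(i - 1) := by ring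
        rw [hm, foldPos_neg n (i - 1) hn, foldRev_neg n (i - 1) hn (by omega)]
        cases rev <;> cases foldRev n (i - 1) <;> simp
      · simp only [if_neg hlt]
        obtain ⟨hp, hr⟩ := foldRev_in_range n i hn (by omega) (by omega)
        rw [hp, hr]
        cases rev <;> simp

-- ===== VERDICT (by name: the statement is the Claim_ definition above) =====
theorem move_axis_spec : Claim_equal_move_axis := by
  intro n i speed direction _ hpre
  have hn : 2 ≤ n := hpre
  have hmod : PySem.Int.mod speed ((n - 1) * 2) = speed % ((n - 1) * 2) :=
    PySem.Int.mod_eq_emod_of_pos (by omega)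
  unfold Spec_move_axis move_axis move_axis_alt
  simp only [hmod]
  rw [moveLoopA_correct _ n (i + speed % ((n - 1) * 2) * direction) false hn (by omega)]
  have hm : i + speed % ((n - 1) * 2) * direction - 1
      = i - 1 + speed % ((n - 1) * 2) * direction := by ring
  rw [hm]
  have hr2 : PySem.Int.mod (i - 1 + speed % ((n - 1) * 2) * direction) ((n - 1) * 2)
      = (i - 1 + speed % ((n - 1) * 2) * direction) % ((n - 1) * 2) :=
    PySem.Int.mod_eq_emod_of_pos (by omega)
  simp only [foldPos, foldRev, hr2, Bool.false_xor]
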